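-- pv_equiv track=rewrite | github.com/bciccarelli/media-summarize | digest.py | render_digest_html
-- ===== SOURCE A (Python) =====
-- CATEGORY_ORDER = ["Research", "Tools", "Opportunity", "Event", "Network Move", "Signal"]
--
-- def render_digest_html(items: list[dict]) -> str:
--     if not items:
--         return ('<p><em>Nothing met the signal bar today. '
--                 'Quiet day — go touch grass.</em></p>')
--
--     by_cat: dict[str, list[dict]] = {}
--     for item in items:
--         by_cat.setdefault(item.get("category", "Signal"), []).append(item)
--
--     parts = []
--     seen_cats = set()
--     ordered_cats = [c for c in CATEGORY_ORDER if c in by_cat] + [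
--         c for c in by_cat if c not in CATEGORY_ORDER
--     ]
--     for cat in ordered_cats:
--         if cat in seen_cats:
--             continue
--         seen_cats.add(cat)
--         parts.append(
--             f'<h2 style="font-size:16px;margin-top:24px;margin-bottom:8px;'
--             f'color:#555;">{cat}</h2>'
--         )
--         parts.append('<ul style="padding-left:20px;margin-top:0;">')
--         for item in by_cat[cat]:
--             url = item.get("url", "")
--             author = item.get("author", "")
--             summary = item.get("summary", "")
--             score = item.get("signal_score", 0)
--             reason = item.get("reason", "")
--             link_html = (
--                 f'<a href="{url}" style="color:#1da1f2;">link</a>'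
--                 if url else ""
--             )
--             platform_badge = "X" if item.get("platform") == "x" else "LI"
--             parts.append(
--                 f'<li style="margin-bottom:10px;">'
--                 f'<strong>{summary}</strong><br>'
--                 f'<span style="color:#888;font-size:13px;">'
--                 f'{platform_badge} · {author} · {reason} · '
--                 f'score {score}{" · " + link_html if link_html else ""}'
--                 f'</span></li>'
--             )
--         parts.append("</ul>")
--     return "\n".join(parts)
-- ===== SOURCE B (Python) =====
-- CATEGORY_ORDER = ["Research", "Tools", "Opportunity", "Event", "Network Move", "Signal"]
--
--
-- def _li(item):
--     url = item.get("url", "")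
--     author = item.get("author", "")
--     summary = item.get("summary", "")
--     score = item.get("signal_score", 0)
--     reason = item.get("reason", "")
--     link_html = (
--         f'<a href="{url}" style="color:#1da1f2;">link</a>'
--         if url else ""
--     )
--     platform_badge = "X" if item.get("platform") == "x" else "LI"
--     return (
--         f'<li style="margin-bottom:10px;">'
--         f'<strong>{summary}</strong><br>'
--         f'<span style="color:#888;font-size:13px;">'
--         f'{platform_badge} · {author} · {reason} · '
--         f'score {score}{" · " + link_html if link_html else ""}'
--         f'</span></li>'
--     )
--
--
-- def render_digest_html(items: list[dict]) -> str:
--     if not items: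
--         return ('<p><em>Nothing met the signal bar today. '
--                 'Quiet day — go touch grass.</em></p>')
--
--     # ordered category list: known categories that occur, then novel ones
--     # in first-appearance order — no grouping dict is built.
--     cats = []
--     for item in items:
--         c = item.get("category", "Signal")
--         if c not in cats:
--             cats.append(c)
--     ordered = [c for c in CATEGORY_ORDER if c in cats] + [
--         c for c in cats if c not in CATEGORY_ORDER
--     ]
--
--     blocks = []
--     for cat in ordered:
--         blocks.append(
--             f'<h2 style="font-size:16px;margin-top:24px;margin-bottom:8px;'
--             f'color:#555;">{cat}</h2>'
--         )
--         blocks.append('<ul style="padding-left:20px;margin-top:0;">')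
--         blocks.extend(
--             _li(item) for item in items
--             if item.get("category", "Signal") == cat
--         )
--         blocks.append("</ul>")
--     return "\n".join(blocks)
-- ===== Notes on version B (the rewrite author's own statement) =====
-- stated objective: alternative
-- what changed: B builds no grouping dict: it computes the ordered category list in one dedup scan and then renders each category's block by filtering the original item list per category.
import Mathlib
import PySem

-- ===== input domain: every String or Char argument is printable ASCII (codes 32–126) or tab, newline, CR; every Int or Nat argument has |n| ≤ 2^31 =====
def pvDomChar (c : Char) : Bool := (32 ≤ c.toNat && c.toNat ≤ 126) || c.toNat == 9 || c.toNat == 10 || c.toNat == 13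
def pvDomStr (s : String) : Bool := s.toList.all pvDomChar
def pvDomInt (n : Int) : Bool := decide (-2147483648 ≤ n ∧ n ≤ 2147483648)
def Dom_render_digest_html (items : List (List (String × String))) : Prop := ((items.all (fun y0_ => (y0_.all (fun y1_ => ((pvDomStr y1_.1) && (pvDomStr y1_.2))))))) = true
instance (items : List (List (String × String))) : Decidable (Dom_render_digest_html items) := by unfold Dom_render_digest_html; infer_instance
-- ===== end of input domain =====

-- B replaces A's one-pass dict grouping by an ordered-category scan followed by a per-category
-- filter of the original item list (alternative decomposition, same rendered string).

def pvCategoryOrder : List String :=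
  ["Research", "Tools", "Opportunity", "Event", "Network Move", "Signal"]

-- ===== PORT A =====
def render_digest_html (items : List (List (String × String))) : String :=
  if items = [] then
    "<p><em>Nothing met the signal bar today. Quiet day — go touch grass.</em></p>"
  else
    -- by_cat.setdefault(item.get("category", "Signal"), []).append(item)
    -- = modify at that key with default [] and append (exact: setdefault-then-append)
    let by_cat : PySem.Dict String (List (List (String × String))) :=
      items.foldl (fun d item =>
        d.modify ((PySem.Dict.mk item).getD "category" "Signal") [] (fun l => l ++ [item]))
        PySem.Dict.empty
    let ordered_cats : List String :=
      pvCategoryOrder.filter (fun c => by_cat.contains c) ++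
        by_cat.keys.filter (fun c => !pvCategoryOrder.contains c)
    let st :=
      ordered_cats.foldl (fun (st : List String × PySem.Set String) cat =>
        if st.2.contains cat then st
        else
          let seen := st.2.add cat
          let parts := st.1 ++
            ["<h2 style=\"font-size:16px;margin-top:24px;margin-bottom:8px;color:#555;\">" ++ cat ++ "</h2>",
             "<ul style=\"padding-left:20px;margin-top:0;\">"]
          -- by_cat[cat]: cat is always a present key here, so Python's KeyError branch is
          -- unreachable and getD with [] is exact
          let parts := (by_cat.getD cat []).foldl (fun ps item =>
            let url := (PySem.Dict.mk item).getD "url" ""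
            let author := (PySem.Dict.mk item).getD "author" ""
            let summary := (PySem.Dict.mk item).getD "summary" ""
            let score := (PySem.Dict.mk item).getD "signal_score" "0"
            let reason := (PySem.Dict.mk item).getD "reason" ""
            let link_html := if url ≠ "" then "<a href=\"" ++ url ++ "\" style=\"color:#1da1f2;\">link</a>" else ""
            let platform_badge := if (PySem.Dict.mk item).get? "platform" = some "x" then "X" else "LI"
            ps ++ ["<li style=\"margin-bottom:10px;\"><strong>" ++ summary ++
              "</strong><br><span style=\"color:#888;font-size:13px;\">" ++
              platform_badge ++ " · " ++ author ++ " · " ++ reason ++ " · score " ++ score ++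
              (if link_html ≠ "" then " · " ++ link_html else "") ++ "</span></li>"]) parts
          (parts ++ ["</ul>"], seen))
        (([] : List String), PySem.Set.empty)
    PySem.Str.join "\n" st.1

-- ===== PORT B =====
def pvCatOf (item : List (String × String)) : String :=
  (PySem.Dict.mk item).getD "category" "Signal"

def pvLi (item : List (String × String)) : String :=
  let url := (PySem.Dict.mk item).getD "url" ""
  let author := (PySem.Dict.mk item).getD "author" ""
  let summary := (PySem.Dict.mk item).getD "summary" ""
  let score := (PySem.Dict.mk item).getD "signal_score" "0"
  let reason := (PySem.Dict.mk item).getD "reason" ""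
  let link_html := if url ≠ "" then "<a href=\"" ++ url ++ "\" style=\"color:#1da1f2;\">link</a>" else ""
  let platform_badge := if (PySem.Dict.mk item).get? "platform" = some "x" then "X" else "LI"
  "<li style=\"margin-bottom:10px;\"><strong>" ++ summary ++
    "</strong><br><span style=\"color:#888;font-size:13px;\">" ++
    platform_badge ++ " · " ++ author ++ " · " ++ reason ++ " · score " ++ score ++
    (if link_html ≠ "" then " · " ++ link_html else "") ++ "</span></li>"

def render_digest_html_alt (items : List (List (String × String))) : String :=
  if items = [] then
    "<p><em>Nothing met the signal bar today. Quiet day — go touch grass.</em></p>"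
  else
    let cats : List String :=
      items.foldl (fun cats item =>
        let c := pvCatOf item
        if cats.contains c then cats else cats ++ [c]) []
    let ordered : List String :=
      pvCategoryOrder.filter (fun c => cats.contains c) ++
        cats.filter (fun c => !pvCategoryOrder.contains c)
    PySem.Str.join "\n" (ordered.flatMap (fun cat =>
      ["<h2 style=\"font-size:16px;margin-top:24px;margin-bottom:8px;color:#555;\">" ++ cat ++ "</h2>",
       "<ul style=\"padding-left:20px;margin-top:0;\">"] ++
        (items.filter (fun item => pvCatOf item == cat)).map pvLi ++ ["</ul>"]))

-- ===== PRECONDITION & SPEC =====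
def Spec_render_digest_html (items : List (List (String × String))) (out : String) : Prop := out = render_digest_html_alt items
instance (items : List (List (String × String))) (out : String) : Decidable (Spec_render_digest_html items out) := by unfold Spec_render_digest_html; infer_instance

-- ===== CLAIM (what is proved, stated in full; the proofs are below) =====
def Claim_equal_render_digest_html : Prop := ∀ (items : List (List (String × String))), Dom_render_digest_html items → Spec_render_digest_html items (render_digest_html items)

-- ===== LEMMAS AND PROOFS =====

-- A's grouping dict, named for the proofs (definitionally A's foldl)
def pvByCat (items : List (List (String × String))) : PySem.Dict String (List (List (String × String))) :=
  items.foldl (fun d item =>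
    d.modify ((PySem.Dict.mk item).getD "category" "Signal") [] (fun l => l ++ [item]))
    PySem.Dict.empty

-- B's first-appearance category list, named for the proofs
def pvCats (items : List (List (String × String))) : List String :=
  items.foldl (fun cats item =>
    let c := pvCatOf item
    if cats.contains c then cats else cats ++ [c]) []

-- the rendered block of one category (B's shape)
def pvBlock (items : List (List (String × String))) (cat : String) : List String :=
  ["<h2 style=\"font-size:16px;margin-top:24px;margin-bottom:8px;color:#555;\">" ++ cat ++ "</h2>",
   "<ul style=\"padding-left:20px;margin-top:0;\">"] ++
    (items.filter (fun item => pvCatOf item == cat)).map pvLi ++ ["</ul>"]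

lemma pvCats_eq_ofList (items : List (List (String × String))) :
    pvCats items = PySem.Set.ofList (items.map pvCatOf) := by
  rw [PySem.Set.ofList_eq_foldl, List.foldl_map]; rfl

lemma pvByCat_keys (items : List (List (String × String))) :
    (pvByCat items).keys = pvCats items := by
  rw [pvByCat, PySem.Dict.keys_foldl_modify_key, pvCats_eq_ofList]
  simp only [PySem.Dict.keys_empty, PySem.Set.update, PySem.Set.ofList_eq_foldl]
  rfl

lemma pvCats_nodup (items : List (List (String × String))) :
    (pvCats items).Nodup := by
  rw [← pvByCat_keys, pvByCat]
  exact PySem.Dict.nodup_keys_foldl_modify_key _ _ _ _ _ PySem.Dict.nodup_keys_empty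

lemma pvByCat_pairs (items : List (List (String × String))) :
    pvByCat items = (items.map (fun it => (pvCatOf it, it))).foldl
      (fun d p => d.modify p.1 [] (fun l => l ++ [p.2])) PySem.Dict.empty := by
  rw [List.foldl_map]; rfl

lemma pvByCat_getD (items : List (List (String × String))) (c : String) :
    (pvByCat items).getD c [] = items.filter (fun it => pvCatOf it == c) := by
  rw [pvByCat_pairs, PySem.Dict.getD_foldl_modify_append]
  simp [List.filter_map, Function.comp_def]

-- A's seen-guarded accumulation over a duplicate-free category list is a flatMap
lemma pvSeenFold (block : String → List String) :
    ∀ (cs parts : List String) (seen : PySem.Set String),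
      cs.Nodup → (∀ c ∈ cs, c ∉ seen) →
      (cs.foldl (fun (st : List String × PySem.Set String) cat =>
          if st.2.contains cat then st
          else (st.1 ++ block cat, st.2.add cat)) (parts, seen)).1
        = parts ++ cs.flatMap block := by
  intro cs
  induction cs with
  | nil => intro parts seen _ _; simp
  | cons c cs ih =>
    intro parts seen hnd hsn
    have hc : PySem.Set.contains seen c = false := by
      simp [PySem.Set.contains, hsn c (by simp)]
    have hrest : ∀ c' ∈ cs, c' ∉ PySem.Set.add seen c := by
      intro c' hc' hmem
      have hne : c' ≠ c := by
        rintro rfl; exact (List.nodup_cons.mp hnd).1 hc'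
      have : c' ∈ seen ∨ c' = c := by simpa [pysem] using hmem
      rcases this with h1 | h1
      · exact hsn c' (by simp [hc']) h1
      · exact hne h1
    simp only [List.foldl_cons, hc, Bool.false_eq_true, if_false]
    rw [ih (parts ++ block c) (seen.add c) (List.nodup_cons.mp hnd).2 hrest,
      List.flatMap_cons, List.append_assoc]

-- A with the nonempty branch taken and its pieces named (definitional unfolding)
lemma pvA_unfold (items : List (List (String × String))) (h : ¬ items = []) :
    render_digest_html items = PySem.Str.join "\n"
      (((pvCategoryOrder.filter fun c => (pvByCat items).contains c) ++
        ((pvByCat items).keys.filter fun c => !pvCategoryOrder.contains c)).foldl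
        (fun (st : List String × PySem.Set String) cat =>
          if st.2.contains cat then st
          else ((((pvByCat items).getD cat []).foldl (fun ps item => ps ++ [pvLi item])
              (st.1 ++ ["<h2 style=\"font-size:16px;margin-top:24px;margin-bottom:8px;color:#555;\">" ++ cat ++ "</h2>",
                        "<ul style=\"padding-left:20px;margin-top:0;\">"])) ++ ["</ul>"],
            st.2.add cat))
        ([], PySem.Set.empty)).1 := by
  simp only [render_digest_html, if_neg h]; rfl

-- B with the nonempty branch taken and its pieces named (definitional unfolding)
lemma pvB_unfold (items : List (List (String × String))) (h : ¬ items = []) :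
    render_digest_html_alt items = PySem.Str.join "\n"
      (((pvCategoryOrder.filter fun c => (pvCats items).contains c) ++
        ((pvCats items).filter fun c => !pvCategoryOrder.contains c)).flatMap (pvBlock items)) := by
  simp only [render_digest_html_alt, if_neg h]; rfl

-- A's loop body over one category appends exactly B's block for that category
lemma pvStepA_eq (items : List (List (String × String))) :
    (fun (st : List String × PySem.Set String) cat =>
      if st.2.contains cat then st
      else ((((pvByCat items).getD cat []).foldl (fun ps item => ps ++ [pvLi item])
          (st.1 ++ ["<h2 style=\"font-size:16px;margin-top:24px;margin-bottom:8px;color:#555;\">" ++ cat ++ "</h2>",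
                    "<ul style=\"padding-left:20px;margin-top:0;\">"])) ++ ["</ul>"],
        st.2.add cat))
    = (fun (st : List String × PySem.Set String) cat =>
        if st.2.contains cat then st
        else (st.1 ++ pvBlock items cat, st.2.add cat)) := by
  funext st cat
  rw [PySem.List.foldl_append_singleton_eq_map, pvByCat_getD, pvBlock]
  simp [List.append_assoc]

-- ===== VERDICT (by name: the statement is the Claim_ definition above) =====
theorem render_digest_html_spec : Claim_equal_render_digest_html := by
  unfold Claim_equal_render_digest_html
  intro items _
  unfold Spec_render_digest_html
  by_cases h : items = []
  · simp [render_digest_html, render_digest_html_alt, h]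
  · rw [pvA_unfold items h, pvB_unfold items h, pvStepA_eq]
    have hfirst : (pvCategoryOrder.filter fun c => (pvByCat items).contains c)
        = (pvCategoryOrder.filter fun c => (pvCats items).contains c) := by
      apply List.filter_congr
      intro c _
      rw [PySem.Dict.contains_eq_decide_mem_keys, pvByCat_keys, List.contains_eq_mem]
    rw [hfirst, pvByCat_keys]
    have hnodup : ((pvCategoryOrder.filter fun c => (pvCats items).contains c) ++
        ((pvCats items).filter fun c => !pvCategoryOrder.contains c)).Nodup := by
      refine List.Nodup.append ?_ ?_ ?_
      · exact List.Nodup.filter _ (by decide)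
      · exact List.Nodup.filter _ (pvCats_nodup items)
      · intro x hx hy
        have hx' : x ∈ pvCategoryOrder := (List.mem_filter.mp hx).1
        have hy' := (List.mem_filter.mp hy).2
        simp [List.contains_eq_mem, hx'] at hy'
    rw [pvSeenFold (pvBlock items) _ [] PySem.Set.empty hnodup
      (by intro c _ hmem; simp [PySem.Set.empty] at hmem)]
    simp
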